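-- pv_equiv track=rewrite | github.com/folusoft/advent-of-code | 2022/day17.py | pattern_catcher
-- ===== SOURCE A (Python) =====
-- def pattern_catcher(chamber, patterns):
--     for pattern in chamber:
--         if pattern.count('#') < 4:
--             continue
--         num_pattern = chamber.count(pattern)
--         match num_pattern:
--             case 4 | 5| 6:
--                 hashes = [x for x, content in enumerate(pattern) if content == '#']
--                 patterns.add("".join(str(e) for e in hashes))
--     return patterns
-- ===== SOURCE B (Python) =====
-- def pattern_catcher(chamber, patterns):
--     work = list(chamber)
--     while work:
--         p = work[0]
--         before = len(work)
--         work = [q for q in work if q != p]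
--         cnt = before - len(work)
--         if p.count('#') >= 4 and 4 <= cnt <= 6:
--             patterns.add("".join(str(i) for i, c in enumerate(p) if c == '#'))
--     return patterns
-- ===== Notes on version B (the rewrite author's own statement) =====
-- stated objective: alternative
-- what changed: B repeatedly partitions a shrinking worklist: it takes the first remaining pattern, removes its whole equivalence class in one filter, and reads the multiplicity off the length drop, instead of A's per-element chamber.count re-scan over the full chamber.
import Mathlib
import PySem

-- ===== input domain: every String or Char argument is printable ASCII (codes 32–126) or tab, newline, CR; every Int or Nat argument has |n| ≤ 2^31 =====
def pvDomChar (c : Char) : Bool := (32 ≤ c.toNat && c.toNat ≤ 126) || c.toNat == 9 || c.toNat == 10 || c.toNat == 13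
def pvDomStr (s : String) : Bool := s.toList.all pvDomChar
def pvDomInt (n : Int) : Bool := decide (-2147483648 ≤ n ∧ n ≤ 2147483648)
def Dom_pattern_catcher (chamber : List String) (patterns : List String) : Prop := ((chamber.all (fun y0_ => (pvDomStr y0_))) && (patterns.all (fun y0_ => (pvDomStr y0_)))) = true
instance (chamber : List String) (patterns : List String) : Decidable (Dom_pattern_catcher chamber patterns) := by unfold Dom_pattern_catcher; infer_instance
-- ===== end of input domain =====

-- B replaces A's per-element chamber.count re-scan by a worklist partition: it takes the first
-- remaining pattern, removes its whole equivalence class in one filter, and reads the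
-- multiplicity off the length drop. Python A mutates the argument set 'patterns' in place
-- (patterns.add) and returns it; the equivalence proved here is about the RETURN value
-- (B performs the same mutation).

-- ===== PORT A =====
def pattern_catcher (chamber : List String) (patterns : List String) : List String :=
  chamber.foldl (fun acc pattern =>
    if PySem.Str.count pattern "#" < 4 then acc
    else
      match PySem.List.count chamber pattern with
      | 4 | 5 | 6 =>
        let hashes := ((PySem.List.enumerate pattern.toList).filter (fun q => q.2 == '#')).map (fun q => q.1)
        PySem.Set.add acc (PySem.Str.join "" (hashes.map (fun e => PySem.Int.toStr e)))
      | _ => acc) patterns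

-- ===== PORT B =====
-- helper: Source B's signature expression "".join(str(i) for i, c in enumerate(p) if c == '#')
def pcSignature (pattern : String) : String :=
  PySem.Str.join "" (((PySem.List.enumerate pattern.toList).filter (fun q => q.2 == '#')).map (fun q => PySem.Int.toStr q.1))

-- Source B's while-loop over the shrinking worklist
def pcWorkLoop (acc : List String) (work : List String) : List String :=
  match work with
  | [] => acc
  | p :: t =>
    let before : Int := ((p :: t).length : Int)
    let rest := (p :: t).filter (fun q => !(q == p))
    let cnt : Int := before - (rest.length : Int)
    let acc' := if 4 ≤ PySem.Str.count p "#" ∧ (4 ≤ cnt ∧ cnt ≤ 6) then PySem.Set.add acc (pcSignature p) else acc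
    pcWorkLoop acc' rest
termination_by work.length
decreasing_by
  simp only [List.filter_cons, BEq.rfl, Bool.not_true, Bool.false_eq_true, if_false, List.length_cons]
  exact Nat.lt_succ_of_le (List.length_filter_le _ _)

def pattern_catcher_alt (chamber : List String) (patterns : List String) : List String :=
  pcWorkLoop patterns chamber

-- ===== PRECONDITION & SPEC =====
def Spec_pattern_catcher (chamber : List String) (patterns : List String) (out : List String) : Prop := out = pattern_catcher_alt chamber patterns
instance (chamber : List String) (patterns : List String) (out : List String) : Decidable (Spec_pattern_catcher chamber patterns out) := by unfold Spec_pattern_catcher; infer_instance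

-- ===== CLAIM (what is proved, stated in full; the proofs are below) =====
def Claim_equal_pattern_catcher : Prop := ∀ (chamber : List String) (patterns : List String), Dom_pattern_catcher chamber patterns → Spec_pattern_catcher chamber patterns (pattern_catcher chamber patterns)

-- ===== LEMMAS AND PROOFS =====

-- the common guard of both loops (a Bool predicate on the pattern; the list used for counting is a parameter)
def pcQ (l : List String) (p : String) : Bool :=
  !(PySem.Str.count p "#" < 4) &&
    (List.count p l = 4 ∨ List.count p l = 5 ∨ List.count p l = 6)

-- the common loop body
def pcF (l : List String) (acc : List String) (p : String) : List String :=
  if pcQ l p then PySem.Set.add acc (pcSignature p) else acc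

-- Set.contains is membership
theorem pc_contains {β : Type} [BEq β] [LawfulBEq β] (s : List β) (y : β) :
    PySem.Set.contains s y = decide (y ∈ s) := by simp [PySem.Set.contains]

-- membership in the accumulator is preserved by a loop step
theorem pcF_mem_mono {α : Type} (Q : α → Bool) (g : α → String)
    (a : List String) (x : α) (z : String) (hz : z ∈ a) :
    z ∈ (if Q x then PySem.Set.add a (g x) else a) := by
  split
  · exact (PySem.Set.mem_add a (g x) z).mpr (Or.inl hz)
  · exact hz

-- elements equal to an already-processed x are skipped by the loop
theorem pc_foldl_skip {α : Type} [BEq α] [LawfulBEq α] (Q : α → Bool) (g : α → String) (x : α)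
    (l : List α) : ∀ (a : List String), (Q x = true → g x ∈ a) →
    (l.filter (fun y => !(y == x))).foldl (fun a y => if Q y then PySem.Set.add a (g y) else a) a
      = l.foldl (fun a y => if Q y then PySem.Set.add a (g y) else a) a := by
  induction l with
  | nil => intro a _; rfl
  | cons y t ih =>
    intro a ha
    by_cases hy : y = x
    · subst hy
      have hstep : (if Q y then PySem.Set.add a (g y) else a) = a := by
        by_cases hq : Q y = true
        · simp [hq, PySem.Set.add_of_mem (ha hq)]
        · simp [hq]
      simp only [List.filter_cons, BEq.rfl, Bool.not_true, Bool.false_eq_true, if_false,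
        List.foldl_cons, hstep]
      exact ih a ha
    · have hb : (y == x) = false := by simp [hy]
      simp only [List.filter_cons, hb, Bool.not_false, if_true, List.foldl_cons]
      exact ih _ (fun hq => pcF_mem_mono Q g a y (g x) (ha hq))

-- characterisation of folding Set.add from an arbitrary start set
theorem pc_foldl_add_char {β : Type} [BEq β] [LawfulBEq β] (t : List β) :
    ∀ (s : List β), t.foldl PySem.Set.add s
      = s ++ (t.foldl PySem.Set.add []).filter (fun y => !(PySem.Set.contains s y)) := by
  induction t with
  | nil => intro s; simp
  | cons a r ih =>
    intro s
    have h0 : PySem.Set.add ([] : List β) a = [a] := rfl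
    simp only [List.foldl_cons, h0]
    rw [ih (PySem.Set.add s a), ih [a]]
    by_cases ha : a ∈ s
    · rw [PySem.Set.add_of_mem ha]
      simp only [pc_contains, List.filter_append, List.filter_filter, List.filter_singleton]
      rw [show List.filter (fun y => !decide (y ∈ s)) (List.foldl PySem.Set.add [] r)
            = List.filter (fun y => !decide (y ∈ s) && !(y == a)) (List.foldl PySem.Set.add [] r) from
          List.filter_congr (fun y _ => by
            by_cases hya : y = a
            · subst hya; simp [ha]
            · simp [hya])]
      simp [ha]
    · have hadd : PySem.Set.add s a = s ++ [a] := by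
        simp [PySem.Set.add, ha]
      rw [hadd]
      simp only [pc_contains, List.filter_append, List.filter_filter, List.filter_singleton]
      rw [show List.filter (fun y => !decide (y ∈ s ++ [a])) (List.foldl PySem.Set.add [] r)
            = List.filter (fun y => !decide (y ∈ s) && !(y == a)) (List.foldl PySem.Set.add [] r) from
          List.filter_congr (fun y _ => by
            by_cases hy1 : y ∈ s <;> by_cases hy2 : y = a <;> simp [hy1, hy2])]
      simp [ha]

-- the distinct elements of a cons: head, then the later distinct elements other than the head
theorem pc_ofList_cons {α : Type} [BEq α] [LawfulBEq α] (x : α) (t : List α) :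
    PySem.Set.ofList (x :: t) = x :: (PySem.Set.ofList t).filter (fun y => !(y == x)) := by
  rw [PySem.Set.ofList_eq_foldl, List.foldl_cons]
  have h0 : PySem.Set.add ([] : List α) x = [x] := rfl
  rw [h0, pc_foldl_add_char t [x], ← PySem.Set.ofList_eq_foldl]
  rw [show List.filter (fun y => !(PySem.Set.contains [x] y)) (PySem.Set.ofList t)
        = List.filter (fun y => !(y == x)) (PySem.Set.ofList t) from
      List.filter_congr (fun y _ => by
        by_cases hyx : y = x <;> simp [hyx])]
  rfl

-- the loop over a list equals the loop over its set of distinct elements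
theorem pc_foldl_ofList {α : Type} [BEq α] [LawfulBEq α] (Q : α → Bool) (g : α → String)
    (xs : List α) : ∀ (s : List String),
    xs.foldl (fun a y => if Q y then PySem.Set.add a (g y) else a) s
      = (PySem.Set.ofList xs).foldl (fun a y => if Q y then PySem.Set.add a (g y) else a) s := by
  induction xs with
  | nil => intro s; rfl
  | cons x t ih =>
    intro s
    rw [pc_ofList_cons, List.foldl_cons, List.foldl_cons]
    rw [pc_foldl_skip Q g x (PySem.Set.ofList t) _ (fun hq => by
      simp only [hq, if_pos]
      exact (PySem.Set.mem_add s (g x) (g x)).mpr (Or.inr rfl))]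
    exact ih _

-- taking distinct elements commutes with filtering
theorem pc_ofList_filter {α : Type} [BEq α] [LawfulBEq α] (l : List α) (P : α → Bool) :
    PySem.Set.ofList (l.filter P) = (PySem.Set.ofList l).filter P := by
  induction l with
  | nil => rfl
  | cons x t ih =>
    by_cases hx : P x = true
    · rw [List.filter_cons_of_pos hx, pc_ofList_cons, ih, pc_ofList_cons,
        List.filter_cons_of_pos hx, List.filter_filter, List.filter_filter]
      exact congrArg (x :: ·) (List.filter_congr (fun y _ => by rw [Bool.and_comm]))
    · rw [List.filter_cons_of_neg hx, ih, pc_ofList_cons, List.filter_cons_of_neg hx,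
        List.filter_filter]
      exact (List.filter_congr (fun y hy => by
        by_cases hyx : y = x
        · subst hyx; simp [hx]
        · simp [hyx])).symm

-- removing the head's equivalence class does not change other elements' counts
theorem pc_count_filter_ne {α : Type} [BEq α] [LawfulBEq α] (p q : α) (t : List α) (h : q ≠ p) :
    List.count q (t.filter (fun y => !(y == p))) = List.count q t := by
  induction t with
  | nil => rfl
  | cons y r ih =>
    by_cases hyp : y = p
    · subst hyp
      rw [List.filter_cons_of_neg (by simp), List.count_cons_of_ne h.symm]
      exact ih
    · rw [List.filter_cons_of_pos (by simp [hyp]), List.count_cons, List.count_cons, ih]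

-- the length drop of the partition is the head's multiplicity
theorem pc_length_drop (p : String) (t : List String) :
    (((p :: t).length : Int)) - (((p :: t).filter (fun q => !(q == p))).length : Int)
      = (List.count p (p :: t) : Int) := by
  have hf : (p :: t).filter (fun q => !(q == p)) = t.filter (fun q => !(q == p)) := by
    simp
  have h2 : t.length = (t.filter (fun q => (q == p))).length
      + (t.filter (fun q => !(q == p))).length := by
    simpa using List.length_eq_length_filter_add (l := t) (fun q => (q == p))
  have h3 : (t.filter (fun q => (q == p))).length = List.count p t := by
    rw [← List.countP_eq_length_filter]; rfl
  have h4 : List.count p (p :: t) = List.count p t + 1 := List.count_cons_self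
  rw [hf]
  simp only [List.length_cons]
  omega

-- B's worklist recursion computes the loop over the distinct elements
theorem pcWorkLoop_eq : ∀ (n : Nat) (w : List String), w.length ≤ n → ∀ (acc : List String),
    pcWorkLoop acc w = (PySem.Set.ofList w).foldl (pcF w) acc := by
  intro n
  induction n with
  | zero =>
    intro w hw acc
    have hnil : w = [] := List.eq_nil_of_length_eq_zero (Nat.le_zero.mp hw)
    subst hnil
    rw [pcWorkLoop, PySem.Set.ofList_eq_foldl]
    rfl
  | succ n ih =>
    intro w hw acc
    match w with
    | [] =>
      rw [pcWorkLoop, PySem.Set.ofList_eq_foldl]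
      rfl
    | p :: t =>
      have hf : (p :: t).filter (fun q => !(q == p)) = t.filter (fun q => !(q == p)) := by
        simp
      have hlen : (t.filter (fun q => !(q == p))).length ≤ n := by
        have := List.length_filter_le (fun q => !(q == p)) t
        simp only [List.length_cons] at hw; omega
      -- one step of B's recursion is one step of the common loop body on the partition
      have hbody : (if 4 ≤ PySem.Str.count p "#" ∧
            (4 ≤ ((((p :: t).length : Int)) - (((p :: t).filter (fun q => !(q == p))).length : Int)) ∧
             (((((p :: t).length : Int)) - (((p :: t).filter (fun q => !(q == p))).length : Int)) ≤ 6))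
          then PySem.Set.add acc (pcSignature p) else acc) = pcF (p :: t) acc p := by
        unfold pcF pcQ
        rw [pc_length_drop]
        by_cases h4 : PySem.Str.count p "#" < 4
        · rw [if_neg (by omega), show (decide (PySem.Str.count p "#" < 4)) = true from decide_eq_true h4]
          simp
        · rw [show (decide (PySem.Str.count p "#" < 4)) = false from decide_eq_false h4]
          by_cases hm : List.count p (p :: t) = 4 ∨ List.count p (p :: t) = 5 ∨ List.count p (p :: t) = 6
          · rw [if_pos ⟨by omega, by rcases hm with h | h | h <;> rw [h] <;> exact ⟨by decide, by decide⟩⟩,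
              decide_eq_true hm]
            simp
          · rw [if_neg (by rintro ⟨-, h1, h2⟩; exact hm (by omega)), decide_eq_false hm]
            simp
      have hstep : pcWorkLoop acc (p :: t)
          = pcWorkLoop (pcF (p :: t) acc p) (t.filter (fun q => !(q == p))) := by
        rw [pcWorkLoop]
        simp only [← hf, hbody]
      rw [hstep, ih _ hlen, pc_ofList_filter, pc_ofList_cons, List.foldl_cons]
      exact PySem.List.foldl_congr_mem ((PySem.Set.ofList t).filter (fun y => !(y == p))) _ _ _ (fun a q hq => by
        have hq' : q ∈ PySem.Set.ofList t ∧ (!(q == p)) = true := List.mem_filter.mp hq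
        have hqp : q ≠ p := by simpa using hq'.2
        unfold pcF pcQ
        rw [pc_count_filter_ne p q t hqp, List.count_cons_of_ne hqp.symm])

-- port A is the common loop over the whole chamber
theorem pattern_catcher_eq_foldl (chamber patterns : List String) :
    pattern_catcher chamber patterns = chamber.foldl (pcF chamber) patterns := by
  unfold pattern_catcher
  have hfun : (fun (acc : List String) (pattern : String) =>
      if PySem.Str.count pattern "#" < 4 then acc
      else
        match PySem.List.count chamber pattern with
        | 4 | 5 | 6 =>
          let hashes := ((PySem.List.enumerate pattern.toList).filter (fun q => q.2 == '#')).map (fun q => q.1)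
          PySem.Set.add acc (PySem.Str.join "" (hashes.map (fun e => PySem.Int.toStr e)))
        | _ => acc) = pcF chamber := by
    funext a p
    unfold pcF pcQ
    have hc : PySem.List.count chamber p = List.count p chamber := by
      simp [PySem.List.count]
    by_cases h4 : PySem.Str.count p "#" < 4
    · rw [if_pos h4, show (decide (PySem.Str.count p "#" < 4)) = true from decide_eq_true h4]
      simp
    · rw [if_neg h4, hc,
        show (decide (PySem.Str.count p "#" < 4)) = false from decide_eq_false h4]
      rcases hn : List.count p chamber with _ | _ | _ | _ | _ | _ | _ | n <;>
        simp [pcSignature, List.map_map] <;> rfl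
  rw [hfun]

-- ===== VERDICT (by name: the statement is the Claim_ definition above) =====
theorem pattern_catcher_spec : Claim_equal_pattern_catcher := by
  intro chamber patterns _
  unfold Spec_pattern_catcher pattern_catcher_alt
  rw [pattern_catcher_eq_foldl,
    pcWorkLoop_eq chamber.length chamber (Nat.le_refl _) patterns]
  exact pc_foldl_ofList (pcQ chamber) pcSignature chamber patterns
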